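-- pv_equiv track=rewrite | github.com/berrybearw/Python_Zabbix_report | create_report.py | format_two_column_table
-- ===== SOURCE A (Python) =====
-- def format_two_column_table(data, title1="Timestamp", value1="Value", title2="Timestamp", value2="Value"):
--     table_data = [[title1, value1, title2, value2]]
--     for i in range(0, len(data), 2):
--         row = []
--         row.extend(data[i])
--         if i + 1 < len(data):
--             row.extend(data[i + 1])
--         else:
--             row.extend(["", ""])  # 補空
--         table_data.append(row)
--     return table_data
-- ===== SOURCE B (Python) =====
-- def format_two_column_table(data, title1="Timestamp", value1="Value", title2="Timestamp", value2="Value"):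
--     padded = list(data)
--     if len(padded) % 2:
--         padded.append(["", ""])  # one pad so the two slices have equal length
--     rows = [list(a) + list(b) for a, b in zip(padded[::2], padded[1::2])]
--     return [[title1, value1, title2, value2]] + rows
-- ===== Notes on version B (the rewrite author's own statement) =====
-- stated objective: idiomatic
-- what changed: Instead of a single index loop stepping by two with an in-loop boundary test for the pad, B pads the list once up front, splits it into the two strided slices padded[::2] and padded[1::2], and zips them into rows with a comprehension.
import Mathlib
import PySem

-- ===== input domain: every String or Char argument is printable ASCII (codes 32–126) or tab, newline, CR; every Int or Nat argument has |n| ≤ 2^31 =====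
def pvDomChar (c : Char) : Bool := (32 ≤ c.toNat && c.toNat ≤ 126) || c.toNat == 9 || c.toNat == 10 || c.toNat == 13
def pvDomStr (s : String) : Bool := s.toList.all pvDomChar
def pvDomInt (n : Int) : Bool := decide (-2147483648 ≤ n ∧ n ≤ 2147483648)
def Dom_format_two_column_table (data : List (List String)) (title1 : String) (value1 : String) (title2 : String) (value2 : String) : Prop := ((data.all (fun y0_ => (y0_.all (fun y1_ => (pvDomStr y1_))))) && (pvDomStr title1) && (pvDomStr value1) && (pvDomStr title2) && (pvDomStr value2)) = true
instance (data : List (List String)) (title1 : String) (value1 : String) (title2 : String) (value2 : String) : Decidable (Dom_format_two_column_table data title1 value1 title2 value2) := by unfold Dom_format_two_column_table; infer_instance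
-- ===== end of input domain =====

-- B pads the list once, splits it into the two strided slices padded[::2] and padded[1::2],
-- and zips them into rows, instead of A's index loop stepping by two with an in-loop pad test;
-- objective: idiomatic.

-- ===== PORT A =====
-- for i in range(0, len(data), 2): row = data[i] (+ data[i+1] if i+1 < len else ["",""]); table_data.append(row)
def format_two_column_table (data : List (List String)) (title1 : String) (value1 : String) (title2 : String) (value2 : String) : List (List String) :=
  (PySem.List.pyRange 0 (data.length : Int) 2).foldl
    (fun table_data i =>
      let row : List String := []
      let row := row ++ PySem.List.pyGetD data i []
      let row := if i + 1 < (data.length : Int) then row ++ PySem.List.pyGetD data (i + 1) []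
                 else row ++ ["", ""]
      table_data ++ [row])
    [[title1, value1, title2, value2]]

-- ===== PORT B =====
-- padded = data (+ ["",""] if odd length); rows = [a+b for a,b in zip(padded[::2], padded[1::2])]
def format_two_column_table_alt (data : List (List String)) (title1 : String) (value1 : String) (title2 : String) (value2 : String) : List (List String) :=
  let padded := if data.length % 2 == 1 then data ++ [["", ""]] else data
  let evens := (PySem.List.slice? padded none none 2).getD []       -- padded[::2]
  let odds  := (PySem.List.slice? padded (some 1) none 2).getD []   -- padded[1::2]
  [[title1, value1, title2, value2]] ++ List.zipWith (fun a b => a ++ b) evens odds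

-- ===== PRECONDITION & SPEC =====
def Spec_format_two_column_table (data : List (List String)) (title1 : String) (value1 : String) (title2 : String) (value2 : String) (out : List (List String)) : Prop := out = format_two_column_table_alt data title1 value1 title2 value2
instance (data : List (List String)) (title1 : String) (value1 : String) (title2 : String) (value2 : String) (out : List (List String)) : Decidable (Spec_format_two_column_table data title1 value1 title2 value2 out) := by unfold Spec_format_two_column_table; infer_instance

-- ===== CLAIM (what is proved, stated in full; the proofs are below) =====
def Claim_equal_format_two_column_table : Prop := ∀ (data : List (List String)) (title1 : String) (value1 : String) (title2 : String) (value2 : String), Dom_format_two_column_table data title1 value1 title2 value2 → Spec_format_two_column_table data title1 value1 title2 value2 (format_two_column_table data title1 value1 title2 value2)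

-- ===== LEMMAS AND PROOFS =====

-- proof-only reference function: rows paired two at a time
def pairRows : List (List String) → List (List String)
  | [] => []
  | [a] => [a ++ ["", ""]]
  | a :: b :: rest => (a ++ b) :: pairRows rest

theorem pyRange_two_eq_nil (a b : Int) (h : b ≤ a) : PySem.List.pyRange a b 2 = [] := by
  rw [PySem.List.pyRange_of_pos a b (by norm_num)]
  simp [not_lt.mpr h]

theorem pyRange_two_cons (a b : Int) (h : a < b) :
    PySem.List.pyRange a b 2 = a :: PySem.List.pyRange (a + 2) b 2 := by
  rw [PySem.List.pyRange_of_pos a b (by norm_num), PySem.List.pyRange_of_pos (a + 2) b (by norm_num)]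
  rw [if_pos h]
  by_cases h2 : a + 2 < b
  · rw [if_pos h2]
    have hc : ((b - a + 2 - 1) / 2).toNat = ((b - (a + 2) + 2 - 1) / 2).toNat + 1 := by omega
    rw [hc, List.range_succ_eq_map, List.map_cons, List.map_map]
    refine congrArg₂ List.cons (by simp) ?_
    apply List.map_congr_left
    intro k _
    simp [Function.comp, Nat.succ_eq_add_one]
    ring
  · rw [if_neg h2]
    have hc : ((b - a + 2 - 1) / 2).toNat = 1 := by omega
    rw [hc]
    simp

theorem pyRange_two_shift (a b : Int) :
    PySem.List.pyRange (a + 2) (b + 2) 2 = (PySem.List.pyRange a b 2).map (· + 2) := by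
  rw [PySem.List.pyRange_of_pos a b (by norm_num), PySem.List.pyRange_of_pos (a + 2) (b + 2) (by norm_num)]
  simp only [add_lt_add_iff_right, List.map_map]
  have hc : b + 2 - (a + 2) + 2 - 1 = b - a + 2 - 1 := by ring
  rw [hc]
  apply List.map_congr_left
  intro k _
  simp [Function.comp]
  ring

theorem loop_eq (data : List (List String)) (acc : List (List String)) :
    (PySem.List.pyRange 0 (data.length : Int) 2).foldl
      (fun table_data i =>
        let row : List String := []
        let row := row ++ PySem.List.pyGetD data i []
        let row := if i + 1 < (data.length : Int) then row ++ PySem.List.pyGetD data (i + 1) []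
                   else row ++ ["", ""]
        table_data ++ [row])
      acc = acc ++ pairRows data := by
  induction data using pairRows.induct generalizing acc with
  | case1 =>
      simp [pairRows, pyRange_two_eq_nil 0 0 (le_refl _)]
  | case2 a =>
      have h1 : ((([a]) : List (List String)).length : Int) = 1 := by simp
      rw [h1, pyRange_two_cons 0 1 (by norm_num), pyRange_two_eq_nil (0 + 2) 1 (by norm_num)]
      simp [pairRows, PySem.List.pyGetD_zero_cons]
  | case3 a b rest ih =>
      have hlen : ((a :: b :: rest).length : Int) = (rest.length : Int) + 2 := by
        push_cast [List.length_cons]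
        ring
      rw [hlen, pyRange_two_cons 0 ((rest.length : Int) + 2) (by omega),
          pyRange_two_shift 0 (rest.length : Int), List.foldl_cons, List.foldl_map]
      have hg0 : PySem.List.pyGetD (a :: b :: rest) 0 [] = a := PySem.List.pyGetD_zero_cons _ _ _
      have hg1' : PySem.List.pyGetD (a :: b :: rest) 1 [] = b := by
        rw [PySem.List.pyGetD_of_nonneg _ _ (by norm_num)]
        rfl
      refine Eq.trans (PySem.List.foldl_congr_mem _ _ (fun td i =>
          let row : List String := []
          let row := row ++ PySem.List.pyGetD rest i []
          let row := if i + 1 < (rest.length : Int) then row ++ PySem.List.pyGetD rest (i + 1) []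
                     else row ++ ["", ""]
          td ++ [row]) _ ?_) ?_
      · intro acc' i hi
        have hi0 : 0 ≤ i := ((PySem.List.mem_pyRange_iff_of_pos (by norm_num) i).mp hi).1
        have hcond : (i + 2 + 1 < (rest.length : Int) + 2) ↔ (i + 1 < (rest.length : Int)) := by omega
        have hg2 : PySem.List.pyGetD (a :: b :: rest) (i + 2) [] = PySem.List.pyGetD rest i [] := by
          rw [PySem.List.pyGetD_of_nonneg _ _ (by omega), PySem.List.pyGetD_of_nonneg _ _ hi0]
          have h2 : (i + 2).toNat = i.toNat + 2 := by omega
          rw [h2]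
          rfl
        have hg3 : PySem.List.pyGetD (a :: b :: rest) (i + 2 + 1) [] = PySem.List.pyGetD rest (i + 1) [] := by
          rw [PySem.List.pyGetD_of_nonneg _ _ (by omega), PySem.List.pyGetD_of_nonneg _ _ (by omega)]
          have h3 : (i + 2 + 1).toNat = (i + 1).toNat + 2 := by omega
          rw [h3]
          rfl
        simp only [hg2, hg3, hcond]
      · rw [ih]
        have h01 : ((0 : Int) + 1 < (rest.length : Int) + 2) := by omega
        have h01' : ((1 : Int) < (rest.length : Int) + 2) := by omega
        simp [pairRows, hg0, hg1', h01']

-- padded[::2] and padded[1::2] as filterMaps over a range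
theorem slice?_evens {α : Type} (xs : List α) :
    PySem.List.slice? xs none none 2 =
      some ((List.range ((xs.length + 1) / 2)).filterMap (fun k => xs[2 * k]?)) := by
  simp only [PySem.List.slice?, PySem.List.sliceIndices]
  norm_num
  have hc : (if 0 < xs.length then (((xs.length : Int) + 2 - 1) / 2).toNat else 0) = (xs.length + 1) / 2 := by
    split <;> omega
  rw [hc]
  congr 1

theorem slice?_odds {α : Type} (xs : List α) :
    PySem.List.slice? xs (some 1) none 2 =
      some ((List.range (xs.length / 2)).filterMap (fun k => xs[2 * k + 1]?)) := by
  simp only [PySem.List.slice?, PySem.List.sliceIndices]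
  norm_num
  rcases Nat.eq_zero_or_pos xs.length with h | h
  · simp [h]
  · have hmin : min (1 : Int) (xs.length : Int) = 1 := by omega
    rw [hmin]
    have hc : (if 1 < xs.length then (((xs.length : Int) - 1 + 2 - 1) / 2).toNat else 0) = xs.length / 2 := by
      split <;> omega
    rw [hc]
    congr 1
    funext k
    congr 1
    omega

theorem evens_cons_cons {α : Type} (a b : α) (r : List α) :
    (List.range (((a :: b :: r).length + 1) / 2)).filterMap (fun k => (a :: b :: r)[2 * k]?) =
      a :: (List.range ((r.length + 1) / 2)).filterMap (fun k => r[2 * k]?) := by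
  have hlen : ((a :: b :: r).length + 1) / 2 = (r.length + 1) / 2 + 1 := by
    simp only [List.length_cons]; omega
  rw [hlen, List.range_succ_eq_map, List.filterMap_cons, List.filterMap_map]
  simp only [Function.comp]
  have h0 : (a :: b :: r)[2 * 0]? = some a := rfl
  rw [h0]
  congr 1

theorem odds_cons_cons {α : Type} (a b : α) (r : List α) :
    (List.range ((a :: b :: r).length / 2)).filterMap (fun k => (a :: b :: r)[2 * k + 1]?) =
      b :: (List.range (r.length / 2)).filterMap (fun k => r[2 * k + 1]?) := by
  have hlen : (a :: b :: r).length / 2 = r.length / 2 + 1 := by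
    simp only [List.length_cons]; omega
  rw [hlen, List.range_succ_eq_map, List.filterMap_cons, List.filterMap_map]
  simp only [Function.comp]
  have h0 : (a :: b :: r)[2 * 0 + 1]? = some b := rfl
  rw [h0]
  congr 1

theorem padded_cons_cons (a b : List String) (r : List (List String)) :
    (if (a :: b :: r).length % 2 == 1 then (a :: b :: r) ++ [["", ""]] else a :: b :: r) =
      a :: b :: (if r.length % 2 == 1 then r ++ [["", ""]] else r) := by
  simp only [List.length_cons]
  have h2 : (r.length + 1 + 1) % 2 = r.length % 2 := by omega
  simp only [h2]
  split <;> rfl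

theorem zip_slices_eq_pairRows (data : List (List String)) :
    List.zipWith (fun a b => a ++ b)
      ((PySem.List.slice? (if data.length % 2 == 1 then data ++ [["", ""]] else data) none none 2).getD [])
      ((PySem.List.slice? (if data.length % 2 == 1 then data ++ [["", ""]] else data) (some 1) none 2).getD [])
    = pairRows data := by
  induction data using pairRows.induct with
  | case1 => rfl
  | case2 a =>
      simp [slice?_evens, slice?_odds, pairRows, List.range_succ]
  | case3 a b r ih =>
      rw [padded_cons_cons, slice?_evens, slice?_odds, Option.getD_some, Option.getD_some,
          evens_cons_cons, odds_cons_cons]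
      rw [slice?_evens, slice?_odds, Option.getD_some, Option.getD_some] at ih
      simp only [List.zipWith_cons_cons, ih, pairRows]

-- ===== VERDICT (by name: the statement is the Claim_ definition above) =====
theorem format_two_column_table_spec : Claim_equal_format_two_column_table := by
  intro data title1 value1 title2 value2 _
  unfold Spec_format_two_column_table format_two_column_table format_two_column_table_alt
  rw [loop_eq]
  simp only [zip_slices_eq_pairRows]
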